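-- pv_equiv track=rewrite | github.com/pypi-data/pypi-mirror-295 | packages/pytppi/pytppi-0.2.tar.gz/pytppi-0.2/src/tppi/org.py | specify
-- ===== SOURCE A (Python) =====
-- def specify(data: str, typeSignature: str = "", tag: str = "") -> str:
--     """Specify data for TPPI content"""
--     spec = []
--     # Filter Data
--     if (not isinstance(data, str)) or len(data) == 0:
--         raise ValueError("Problem in data for specify")
--     if not isinstance(tag, str):
--         raise ValueError("Problem in tag for specify")
--     if not isinstance(typeSignature, str):
--         raise ValueError("Problem in signature for specify")
--     # Add parts available in order
--     if len(typeSignature) > 0: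
--         spec.append(typeSignature)
--         if len(tag) > 0:
--             spec.append(tag)
--     spec.append(data)
--     # Filter
--     spec = [r.replace("~", "%7E") for r in spec]
--     spec = [r.replace("|", "%7C") for r in spec]
--     spec = [r.replace("+", "%2B") for r in spec]
--     # Join all
--     full = "~".join(spec)
--     # Return Specification
--     return full
-- ===== SOURCE B (Python) =====
-- def specify(data: str, typeSignature: str = "", tag: str = "") -> str:
--     """Specify data for TPPI content"""
--     if (not isinstance(data, str)) or len(data) == 0:
--         raise ValueError("Problem in data for specify")
--     if not isinstance(tag, str):
--         raise ValueError("Problem in tag for specify")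
--     if not isinstance(typeSignature, str):
--         raise ValueError("Problem in signature for specify")
--     parts = []
--     if typeSignature:
--         parts.append(typeSignature)
--         if tag:
--             parts.append(tag)
--     parts.append(data)
--     return "~".join(_escape(p) for p in parts)
--
--
-- _CODES = {"~": "%7E", "|": "%7C", "+": "%2B"}
--
--
-- def _escape(s: str) -> str:
--     # one pass over the characters instead of three sequential .replace passes
--     out = []
--     for ch in s:
--         out.append(_CODES.get(ch, ch))
--     return "".join(out)
-- ===== Notes on version B (the rewrite author's own statement) =====
-- stated objective: idiomatic
-- what changed: The three sequential whole-string .replace passes are replaced by a single character-by-character escape pass (each char mapped once through a '~'/'|'/'+' -> %XX table), applied to each part before joining.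
-- outside the precondition, e.g. on specify('', 't', 'g'): A raises ValueError, B raises ValueError
import Mathlib
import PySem

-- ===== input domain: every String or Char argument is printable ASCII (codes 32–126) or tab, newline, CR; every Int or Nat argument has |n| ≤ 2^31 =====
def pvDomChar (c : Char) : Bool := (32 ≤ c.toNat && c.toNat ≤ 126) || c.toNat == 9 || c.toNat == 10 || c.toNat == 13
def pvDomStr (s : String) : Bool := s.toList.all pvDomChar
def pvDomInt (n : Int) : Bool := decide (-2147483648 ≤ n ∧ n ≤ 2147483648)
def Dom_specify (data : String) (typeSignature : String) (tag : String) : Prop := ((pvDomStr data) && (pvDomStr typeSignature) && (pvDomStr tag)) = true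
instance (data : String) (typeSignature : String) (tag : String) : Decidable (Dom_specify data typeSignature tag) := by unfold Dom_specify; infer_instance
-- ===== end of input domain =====

-- B replaces A's three sequential whole-string .replace passes by one character-by-character
-- escape pass per part (objective: idiomatic); the ValueError guards become Pre_specify.

-- ===== PORT A =====
-- literal transliteration of A: build spec, three list-comprehension replace passes, join
def specify (data : String) (typeSignature : String) (tag : String) : String :=
  let spec : List String :=
    (if typeSignature.length > 0 then
        [typeSignature] ++ (if tag.length > 0 then [tag] else [])
      else []) ++ [data]
  let spec := spec.map (fun r => PySem.Str.replace r "~" "%7E")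
  let spec := spec.map (fun r => PySem.Str.replace r "|" "%7C")
  let spec := spec.map (fun r => PySem.Str.replace r "+" "%2B")
  PySem.Str.join "~" spec

-- ===== PORT B =====
-- _CODES.get(ch, ch) of Source B, written as the corresponding decision chain
def escChar (c : Char) : List Char :=
  if c = '~' then "%7E".toList
  else if c = '|' then "%7C".toList
  else if c = '+' then "%2B".toList
  else [c]

-- _escape of Source B: one pass over the characters, concatenating the mapped pieces
def escape (s : String) : String := String.ofList (s.toList.flatMap escChar)

def specify_alt (data : String) (typeSignature : String) (tag : String) : String :=
  let parts : List String :=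
    (if typeSignature.length > 0 then
        [typeSignature] ++ (if tag.length > 0 then [tag] else [])
      else []) ++ [data]
  PySem.Str.join "~" (parts.map escape)

-- ===== PRECONDITION & SPEC =====
-- A raises ValueError exactly when data is empty; those inputs are excluded.
def Pre_specify (data : String) (typeSignature : String) (tag : String) : Prop := data ≠ ""
instance (data : String) (typeSignature : String) (tag : String) : Decidable (Pre_specify data typeSignature tag) := by unfold Pre_specify; infer_instance
def pvWitness_specify : String × String × String := ("a", "sig", "tag")
def Spec_specify (data : String) (typeSignature : String) (tag : String) (out : String) : Prop := out = specify_alt data typeSignature tag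
instance (data : String) (typeSignature : String) (tag : String) (out : String) : Decidable (Spec_specify data typeSignature tag out) := by unfold Spec_specify; infer_instance

-- ===== CLAIM (what is proved, stated in full; the proofs are below) =====
def Claim_equal_specify : Prop := ∀ (data : String) (typeSignature : String) (tag : String), Dom_specify data typeSignature tag → Pre_specify data typeSignature tag → Spec_specify data typeSignature tag (specify data typeSignature tag)

-- ===== LEMMAS AND PROOFS =====

-- replace with a single-character pattern is a per-character flatMap
theorem replace_go_single (o : Char) (new : List Char) :
    ∀ (fuel : Nat) (l acc : List Char), l.length ≤ fuel →
      PySem.Chars.replace.go [o] new fuel l acc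
        = acc.reverse ++ l.flatMap (fun c => if c = o then new else [c]) := by
  intro fuel
  induction fuel with
  | zero =>
      intro l acc h
      cases l with
      | nil => simp [PySem.Chars.replace.go]
      | cons c t => simp at h
  | succ n ih =>
      intro l acc h
      cases l with
      | nil => simp [PySem.Chars.replace.go]
      | cons c t =>
          have ht : t.length ≤ n := by simpa using Nat.succ_le_succ_iff.mp (by simpa using h)
          have hpre : List.isPrefixOf [o] (c :: t) = (o == c) := by
            simp [List.isPrefixOf]
          by_cases hc : c = o
          · subst hc
            rw [PySem.Chars.replace.go, hpre, if_pos (by simp)]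
            simp only [List.length_cons, List.drop_succ_cons, List.length_nil, List.drop_zero]
            rw [ih t (new.reverse ++ acc) ht]
            simp
          · rw [PySem.Chars.replace.go, hpre,
              if_neg (by simp; exact fun h' => hc h'.symm)]
            rw [ih t (c :: acc) ht]
            simp [hc]

theorem replace_single (o : Char) (new s : List Char) :
    PySem.Chars.replace s [o] new = s.flatMap (fun c => if c = o then new else [c]) := by
  rw [PySem.Chars.replace]
  simp only [List.isEmpty_cons, if_false, Bool.false_eq_true]
  simpa using replace_go_single o new s.length s [] (le_refl _)

-- the three sequential single-character replaces collapse to the one-pass escape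
theorem chain_eq_escape (s : String) :
    PySem.Str.replace (PySem.Str.replace (PySem.Str.replace s "~" "%7E") "|" "%7C") "+" "%2B"
      = escape s := by
  apply String.toList_injective
  simp only [PySem.Str.toList_replace, escape, String.toList_ofList]
  rw [show "~".toList = ['~'] from rfl, show "|".toList = ['|'] from rfl,
      show "+".toList = ['+'] from rfl]
  rw [replace_single, replace_single, replace_single]
  induction s.toList with
  | nil => simp
  | cons c t ih =>
      simp only [List.flatMap_cons, List.flatMap_append, ih]
      congr 1
      by_cases h1 : c = '~'
      · subst h1; decide
      · by_cases h2 : c = '|'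
        · subst h2; decide
        · by_cases h3 : c = '+'
          · subst h3; decide
          · simp [escChar, h1, h2, h3]

-- ===== VERDICT (by name: the statement is the Claim_ definition above) =====
theorem specify_spec : Claim_equal_specify := by
  intro data typeSignature tag _ _
  unfold Spec_specify specify specify_alt
  simp only [List.map_map]
  exact congrArg _ (List.map_congr_left (fun r _ => chain_eq_escape r))
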